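-- pv_equiv track=rewrite | github.com/yagamiram/Programming_challenges | wave_sort.py | wave
-- ===== SOURCE A (Python) =====
-- def wave(A):
--     if len(A) == 0:
--         return A
--     else:
--         # the list has numbers more than 2
--         final_list = list()
--         nums = A
--         nums.sort()
--         num_len = len(nums)-1
--         # case 1 True
--         # case 2 False
--         case_flag = True
--         # two cases totally
--         idx = 0
--         while idx <= num_len:
--             # Get idx+2 and idx+3
--             if case_flag ==True:
--                 if idx+3 <= num_len:
--                     # Add idx+1 first, idx in middle idx+3 third
--                     final_list += [nums[idx+1], nums[idx], nums[idx+3]]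
--                     case_flag = False
--                     idx += 2
--                 else:
--                     # no idx+3 so u have to manage with idx+1 and idx+2
--                     if idx+2 <= num_len:
--                         final_list += [nums[idx+1], nums[idx], nums[idx+2]]
--                         return final_list
--                     if idx+1 <= num_len:
--                         # no idx+2 so manage with idx+2
--                         final_list += [nums[idx+1], nums[idx]]
--                         return final_list
--                     # no idx+1 so add idx alone
--                     final_list += [nums[idx]]
--                     return final_list
--             else:
--                 # case flag is False which means we are in case
--                 if idx+3 <= num_len:
--                     # add in the order : idx idx+3 and idx+2
--                     final_list += [nums[idx] , nums[idx+3], nums[idx+2]]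
--                     idx += 4
--                     case_flag = True
--                 else:
--                     # no idx+3 so manage with idx+2
--                     if idx+2 <= num_len:
--                         final_list += [nums[idx], nums[idx+2]]
--                         return final_list
--                     # no idx+2 so add jus idx
--                     final_list += [nums[idx]]
--                     return final_list
--             #print final_list, idx
--         return final_list
-- ===== SOURCE B (Python) =====
-- def wave(A):
--     # Note: like the original, this sorts A in place; a fresh waved list is returned.
--     A.sort()
--     res = []
--     i = 1
--     while i < len(A):
--         res.append(A[i])
--         res.append(A[i - 1])
--         i += 2
--     if len(A) % 2 == 1:
--         res.append(A[-1])
--     return res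
-- ===== Notes on version B (the rewrite author's own statement) =====
-- stated objective: simpler
-- what changed: Replaces the case_flag state machine emitting 3-element chunks in two alternating shapes with a single uniform loop that appends each adjacent sorted pair swapped, plus the odd tail.
import Mathlib
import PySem

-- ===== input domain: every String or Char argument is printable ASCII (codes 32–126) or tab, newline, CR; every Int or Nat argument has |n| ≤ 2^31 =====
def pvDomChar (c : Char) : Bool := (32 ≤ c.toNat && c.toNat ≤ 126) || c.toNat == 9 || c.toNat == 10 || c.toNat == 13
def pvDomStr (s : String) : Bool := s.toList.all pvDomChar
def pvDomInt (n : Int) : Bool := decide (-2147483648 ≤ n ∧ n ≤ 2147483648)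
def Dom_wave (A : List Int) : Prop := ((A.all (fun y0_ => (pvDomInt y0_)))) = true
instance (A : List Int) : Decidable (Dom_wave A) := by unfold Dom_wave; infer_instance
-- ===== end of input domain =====

-- B replaces A's case_flag state machine with one uniform swapped-pair loop (objective: simpler).
-- Both A and B sort the argument list in place in Python; the equivalence proved here is about the return value.

-- ===== PORT A =====
-- the while loop of A: state (idx, case_flag, final_list); numLen = len(nums)-1
def waveLoop (nums : List Int) (numLen : Nat) (idx : Nat) (caseFlag : Bool) (acc : List Int) : List Int :=
  if idx ≤ numLen then
    if caseFlag then
      if idx + 3 ≤ numLen then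
        waveLoop nums numLen (idx + 2) false
          (acc ++ [nums.getD (idx+1) 0, nums.getD idx 0, nums.getD (idx+3) 0])
      else if idx + 2 ≤ numLen then
        acc ++ [nums.getD (idx+1) 0, nums.getD idx 0, nums.getD (idx+2) 0]
      else if idx + 1 ≤ numLen then
        acc ++ [nums.getD (idx+1) 0, nums.getD idx 0]
      else
        acc ++ [nums.getD idx 0]
    else
      if idx + 3 ≤ numLen then
        waveLoop nums numLen (idx + 4) true
          (acc ++ [nums.getD idx 0, nums.getD (idx+3) 0, nums.getD (idx+2) 0])
      else if idx + 2 ≤ numLen then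
        acc ++ [nums.getD idx 0, nums.getD (idx+2) 0]
      else
        acc ++ [nums.getD idx 0]
  else acc
termination_by numLen + 1 - idx
decreasing_by all_goals omega

def wave (A : List Int) : List Int :=
  if A.length = 0 then A
  else
    let nums := PySem.List.sorted A (fun x => x) false
    waveLoop nums (nums.length - 1) 0 true []

-- ===== PORT B =====
-- B's while loop: i from 1 stepping by 2, appending the swapped pair A[i], A[i-1]
def waveAltLoop (s : List Int) (i : Nat) (res : List Int) : List Int :=
  if i < s.length then waveAltLoop s (i + 2) (res ++ [s.getD i 0, s.getD (i-1) 0])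
  else res
termination_by s.length - i
decreasing_by omega

def wave_alt (A : List Int) : List Int :=
  let s := PySem.List.sorted A (fun x => x) false
  let res := waveAltLoop s 1 []
  if s.length % 2 = 1 then res ++ [PySem.List.pyGetD s (-1) 0] else res

-- ===== PRECONDITION & SPEC =====
def Spec_wave (A : List Int) (out : List Int) : Prop := out = wave_alt A
instance (A : List Int) (out : List Int) : Decidable (Spec_wave A out) := by unfold Spec_wave; infer_instance

-- ===== CLAIM (what is proved, stated in full; the proofs are below) =====
def Claim_equal_wave : Prop := ∀ (A : List Int), Dom_wave A → Spec_wave A (wave A)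

-- ===== LEMMAS AND PROOFS =====

-- the common value: the sorted list with adjacent pairs swapped
def swapPairs : List Int → List Int
  | [] => []
  | [x] => [x]
  | x :: y :: r => y :: x :: swapPairs r

lemma drop_step (l : List Int) (i : Nat) (h : i < l.length) :
    l.drop i = l.getD i 0 :: l.drop (i + 1) := by
  rw [List.drop_eq_getElem_cons h, List.getD_eq_getElem l 0 h]

lemma drop_nil (l : List Int) (i : Nat) (h : l.length ≤ i) : l.drop i = [] :=
  List.drop_eq_nil_of_le h

lemma waveLoop_eq (nums : List Int) (idx : Nat) (caseFlag : Bool) (acc : List Int)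
    (h0 : 0 < nums.length)
    (h : if caseFlag then idx ≤ nums.length else idx + 1 ≤ nums.length) :
    waveLoop nums (nums.length - 1) idx caseFlag acc =
      acc ++ (if caseFlag then swapPairs (nums.drop idx)
              else nums.getD idx 0 :: swapPairs (nums.drop (idx + 2))) := by
  rw [waveLoop]
  cases caseFlag with
  | true =>
    simp only [if_true] at h ⊢
    by_cases h1 : idx ≤ nums.length - 1
    · simp only [h1, if_true]
      by_cases h3 : idx + 3 ≤ nums.length - 1
      · simp only [h3, if_true]
        rw [waveLoop_eq nums (idx+2) false _ h0 (by simp; omega)]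
        rw [drop_step nums idx (by omega), drop_step nums (idx+1) (by omega)]
        rw [show idx+1+1 = idx+2 from by omega, drop_step nums (idx+2) (by omega),
            show idx+2+1 = idx+3 from by omega, drop_step nums (idx+3) (by omega),
            show idx+3+1 = idx+2+2 from by omega]
        simp [swapPairs]
      · simp only [h3, if_false]
        by_cases h2 : idx + 2 ≤ nums.length - 1
        · simp only [h2, if_true]
          rw [drop_step nums idx (by omega), drop_step nums (idx+1) (by omega),
              drop_step nums (idx+2) (by omega), drop_nil nums (idx+3) (by omega)]
          simp [swapPairs]
        · simp only [h2, if_false]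
          by_cases hx : idx + 1 ≤ nums.length - 1
          · simp only [hx, if_true]
            rw [drop_step nums idx (by omega), drop_step nums (idx+1) (by omega),
                drop_nil nums (idx+2) (by omega)]
            simp [swapPairs]
          · simp only [hx, if_false]
            rw [drop_step nums idx (by omega), drop_nil nums (idx+1) (by omega)]
            simp [swapPairs]
    · simp only [h1, if_false]
      rw [drop_nil nums idx (by omega)]
      simp [swapPairs]
  | false =>
    simp only [Bool.false_eq_true, if_false] at h
    simp only [Bool.false_eq_true, if_false]
    have h1 : idx ≤ nums.length - 1 := by omega
    simp only [h1, if_true]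
    by_cases h3 : idx + 3 ≤ nums.length - 1
    · simp only [h3, if_true]
      rw [waveLoop_eq nums (idx+4) true _ h0 (by simp; omega)]
      rw [drop_step nums (idx+2) (by omega),
          show idx+2+1 = idx+3 from by omega, drop_step nums (idx+3) (by omega),
          show idx+3+1 = idx+4 from by omega]
      simp [swapPairs]
    · simp only [h3, if_false]
      by_cases h2 : idx + 2 ≤ nums.length - 1
      · simp only [h2, if_true]
        rw [drop_step nums (idx+2) (by omega), drop_nil nums (idx+3) (by omega)]
        simp [swapPairs]
      · simp only [h2, if_false]
        rw [drop_nil nums (idx+2) (by omega)]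
        simp [swapPairs]
termination_by nums.length + 1 - idx
decreasing_by all_goals omega

lemma waveAltLoop_eq (s : List Int) (i : Nat) (res : List Int)
    (hodd : i % 2 = 1) (hle : i ≤ s.length + 1) :
    waveAltLoop s i res ++ (if s.length % 2 = 1 then [s.getD (s.length - 1) 0] else []) =
      res ++ swapPairs (s.drop (i - 1)) := by
  rw [waveAltLoop]
  by_cases h : i < s.length
  · simp only [h, if_true]
    rw [waveAltLoop_eq s (i+2) _ (by omega) (by omega)]
    have h1 : i - 1 < s.length := by omega
    rw [drop_step s (i-1) h1, show i - 1 + 1 = i from by omega, drop_step s i h,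
        show i + 2 - 1 = i + 1 from by omega]
    simp [swapPairs]
  · simp only [h, if_false]
    by_cases hp : s.length % 2 = 1
    · simp only [hp, if_true]
      have hi : i = s.length := by omega
      subst hi
      rw [drop_step s (s.length - 1) (by omega), drop_nil s (s.length - 1 + 1) (by omega)]
      simp [swapPairs]
    · simp only [hp, if_false]
      rw [drop_nil s (i - 1) (by omega)]
      simp [swapPairs]
termination_by s.length - i
decreasing_by omega

-- ===== VERDICT (by name: the statement is the Claim_ definition above) =====
theorem wave_spec : Claim_equal_wave := by
  intro A _
  unfold Spec_wave wave wave_alt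
  by_cases hA : A.length = 0
  · have : A = [] := List.eq_nil_of_length_eq_zero hA
    subst this
    simp [waveAltLoop]
  · simp only [hA, if_false]
    set s := PySem.List.sorted A (fun x => x) false with hs
    have hlen : s.length = A.length := PySem.List.length_sorted ..
    have h0 : 0 < s.length := by omega
    rw [waveLoop_eq s 0 true [] h0 (by simp)]
    have halt := waveAltLoop_eq s 1 [] (by omega) (by omega)
    rw [show (1:Nat) - 1 = 0 from rfl, List.drop_zero, List.nil_append] at halt
    simp only [if_true, List.nil_append, List.drop_zero]
    rw [← halt]
    have hne : s ≠ [] := by intro h; rw [h] at h0; simp at h0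
    by_cases hp : s.length % 2 = 1
    · simp only [hp, if_true]
      congr 1
      rw [PySem.List.pyGetD_neg_one s 0 hne]
      simp [List.getLast_eq_getElem, List.getElem?_eq_getElem (show s.length - 1 < s.length from by omega)]
    · simp [hp]
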